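-- pv_equiv track=rewrite | github.com/Abdulmohseng/6156-Agent-Project | eval/judge.py | _format_actual_structure
-- ===== SOURCE A (Python) =====
-- def _format_actual_structure(file_map: dict) -> str:
--     by_folder: dict[str, list[str]] = {}
--     for original, info in file_map.items():
--         folder = info.get("final_folder") or "__root__ (not moved)"
--         name = info.get("final_name", original)
--         by_folder.setdefault(folder, []).append(name)
--     lines = []
--     for folder, files in sorted(by_folder.items()):
--         lines.append(f"{folder}/")
--         for f in sorted(files):
--             lines.append(f"  {f}")
--     return "\n".join(lines) if lines else "(no files were moved)"
-- ===== SOURCE B (Python) =====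
-- def _format_actual_structure(file_map: dict) -> str:
--     rows = sorted(
--         (info.get("final_folder") or "__root__ (not moved)",
--          info.get("final_name", original))
--         for original, info in file_map.items()
--     )
--     if not rows:
--         return "(no files were moved)"
--     lines = []
--     prev = None
--     for folder, name in rows:
--         if folder != prev:
--             lines.append(folder + "/")
--         lines.append("  " + name)
--         prev = folder
--     return "\n".join(lines)
-- ===== Notes on version B (the rewrite author's own statement) =====
-- stated objective: alternative
-- what changed: Instead of grouping names into a dict of per-folder lists and running a nested sort (folders, then each folder's files), B builds one flat list of (folder, name) pairs, sorts it once lexicographically, and emits folder headers in a single linear scan whenever the folder changes.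
import Mathlib
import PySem

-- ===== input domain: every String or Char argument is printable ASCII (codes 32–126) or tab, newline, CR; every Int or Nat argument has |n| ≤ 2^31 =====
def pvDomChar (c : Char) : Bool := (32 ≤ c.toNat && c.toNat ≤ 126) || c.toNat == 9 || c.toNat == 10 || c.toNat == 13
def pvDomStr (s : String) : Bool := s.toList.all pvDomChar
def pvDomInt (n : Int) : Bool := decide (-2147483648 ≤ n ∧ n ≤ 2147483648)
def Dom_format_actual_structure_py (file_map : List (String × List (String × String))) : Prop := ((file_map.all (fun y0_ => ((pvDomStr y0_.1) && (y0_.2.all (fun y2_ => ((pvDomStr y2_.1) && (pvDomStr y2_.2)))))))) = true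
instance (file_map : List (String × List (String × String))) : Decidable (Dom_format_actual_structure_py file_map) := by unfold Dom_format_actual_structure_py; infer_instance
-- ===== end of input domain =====

-- B replaces A's dict-of-lists grouping plus nested sorts (folders, then each folder's files)
-- by one flat sort of (folder, name) pairs followed by a single scan emitting a header when
-- the folder changes ('alternative'; same asymptotic cost).

-- ===== PORT A =====
-- A's dict parameter arrives as an association list (unique keys, insertion order);
-- the inner dicts are decoded with PySem.Dict.ofList and read with get?.
def format_actual_structure_py (file_map : List (String × List (String × String))) : String :=
  let by_folder : PySem.Dict String (List String) :=
    file_map.foldl (fun d p =>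
      let info := PySem.Dict.ofList p.2
      let folder := match info.get? "final_folder" with
        | some f => if f = "" then "__root__ (not moved)" else f   -- `or`: '' and a missing key both fall back
        | none => "__root__ (not moved)"
      let name := (info.get? "final_name").getD p.1
      d.modify folder [] (fun fs => fs ++ [name])) PySem.Dict.empty
  -- sorted(by_folder.items()): dict keys are unique, so Python's tuple comparison
  -- never reaches the second component — sorting by the key alone is exact.
  let lines : List String :=
    (PySem.List.sorted by_folder.items (fun g => g.1)).foldl
      (fun lines g =>
        (PySem.List.sorted g.2 (fun x => x)).foldl
          (fun ls f => ls ++ ["  " ++ f]) (lines ++ [g.1 ++ "/"]))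
      []
  if lines = [] then "(no files were moved)" else PySem.Str.join "\n" lines

-- ===== PORT B =====
def format_actual_structure_py_alt (file_map : List (String × List (String × String))) : String :=
  let rows : List (String × String) :=
    file_map.map (fun p =>
      let info := PySem.Dict.ofList p.2
      (match info.get? "final_folder" with
        | some f => if f = "" then "__root__ (not moved)" else f
        | none => "__root__ (not moved)",
       (info.get? "final_name").getD p.1))
  let rows := PySem.List.sorted2 rows (fun r => r.1) (fun r => r.2)   -- sorted(pairs): folder, then name
  if rows = [] then "(no files were moved)"
  else
    let st := rows.foldl (fun (st : List String × Option String) r =>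
      ((if st.2 = some r.1 then st.1 else st.1 ++ [r.1 ++ "/"]) ++ ["  " ++ r.2], some r.1))
      ([], none)
    PySem.Str.join "\n" st.1

-- ===== PRECONDITION & SPEC =====
def Spec_format_actual_structure_py (file_map : List (String × List (String × String))) (out : String) : Prop := out = format_actual_structure_py_alt file_map
instance (file_map : List (String × List (String × String))) (out : String) : Decidable (Spec_format_actual_structure_py file_map out) := by unfold Spec_format_actual_structure_py; infer_instance

-- ===== CLAIM (what is proved, stated in full; the proofs are below) =====
def Claim_equal_format_actual_structure_py : Prop := ∀ (file_map : List (String × List (String × String))), Dom_format_actual_structure_py file_map → Spec_format_actual_structure_py file_map (format_actual_structure_py file_map)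

-- ===== LEMMAS AND PROOFS =====

-- the per-entry (folder, name) extraction both Pythons apply to each dict item
def pvExt (p : String × List (String × String)) : String × String :=
  let info := PySem.Dict.ofList p.2
  (match info.get? "final_folder" with
    | some f => if f = "" then "__root__ (not moved)" else f
    | none => "__root__ (not moved)",
   (info.get? "final_name").getD p.1)

-- the names landing in folder k, in row order
def pvNames (rows : List (String × String)) (k : String) : List String :=
  (rows.filter (fun r => r.1 == k)).map (fun r => r.2)

-- the distinct folders, sorted
def pvKs (rows : List (String × String)) : List String :=
  PySem.List.sorted (PySem.Set.ofList (rows.map (fun r => r.1))) (fun x => x)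

-- the output lines of one folder: header, then its sorted, indented names
def pvBlockL (rows : List (String × String)) (k : String) : List String :=
  (k ++ "/") :: (PySem.List.sorted (pvNames rows k) (fun x => x)).map (fun f => "  " ++ f)

def pvLines (rows : List (String × String)) : List String :=
  (pvKs rows).flatMap (pvBlockL rows)

-- the flat sorted row list, written as sorted groups
def pvTarget (rows : List (String × String)) : List (String × String) :=
  (pvKs rows).flatMap (fun k => (PySem.List.sorted (pvNames rows k) (fun x => x)).map (fun n => (k, n)))

-- Python's lexicographic order on (folder, name) pairs, and sorted2's comparison
def pvLexLe (a b : String × String) : Prop := a.1 < b.1 ∨ (a.1 = b.1 ∧ a.2 ≤ b.2)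
def pvBefore (a b : String × String) : Bool :=
  decide (a.1 < b.1) || (!decide (b.1 < a.1) && decide (a.2 < b.2))

-- B's scan step (the foldl body of the alt port)
def pvStep (st : List String × Option String) (r : String × String) : List String × Option String :=
  ((if st.2 = some r.1 then st.1 else st.1 ++ [r.1 ++ "/"]) ++ ["  " ++ r.2], some r.1)

lemma pvBefore_iff (a b : String × String) :
    pvBefore a b = true ↔ (a.1 < b.1 ∨ (a.1 = b.1 ∧ a.2 < b.2)) := by
  simp only [pvBefore, Bool.or_eq_true, Bool.and_eq_true, Bool.not_eq_true',
    decide_eq_true_eq, decide_eq_false_iff_not]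
  constructor
  · rintro (h | ⟨h1, h2⟩)
    · exact Or.inl h
    · rcases lt_trichotomy a.1 b.1 with h' | h' | h'
      · exact Or.inl h'
      · exact Or.inr ⟨h', h2⟩
      · exact absurd h' h1
  · rintro (h | ⟨h1, h2⟩)
    · exact Or.inl h
    · exact Or.inr ⟨by rw [h1]; exact lt_irrefl _, h2⟩

lemma pvNotBefore_iff (a b : String × String) :
    ¬ pvBefore a b = true ↔ pvLexLe b a := by
  rw [pvBefore_iff]
  unfold pvLexLe
  constructor
  · intro h
    rcases lt_trichotomy a.1 b.1 with h' | h' | h'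
    · exact absurd (Or.inl h') h
    · refine Or.inr ⟨h'.symm, ?_⟩
      by_contra hc
      exact h (Or.inr ⟨h', lt_of_not_ge hc⟩)
    · exact Or.inl h'
  · rintro (h | ⟨h1, h2⟩) (h' | ⟨h1', h2'⟩)
    · exact absurd h' (lt_asymm h)
    · exact absurd h1' (ne_of_gt h)
    · exact absurd h' (by rw [h1]; exact lt_irrefl _)
    · exact absurd h2' (not_lt_of_ge h2)

lemma pvLexLe_trans {a b c : String × String} (h1 : pvLexLe a b) (h2 : pvLexLe b c) : pvLexLe a c := by
  rcases h1 with h | ⟨e, le⟩ <;> rcases h2 with h' | ⟨e', le'⟩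
  · exact Or.inl (lt_trans h h')
  · exact Or.inl (e' ▸ h)
  · exact Or.inl (e ▸ h')
  · exact Or.inr ⟨e.trans e', le_trans le le'⟩

lemma pvLexLe_antisymm {a b : String × String} (h1 : pvLexLe a b) (h2 : pvLexLe b a) : a = b := by
  rcases h1 with h | ⟨e, le⟩ <;> rcases h2 with h' | ⟨e', le'⟩
  · exact absurd h' (lt_asymm h)
  · exact absurd h (by rw [e']; exact lt_irrefl _)
  · exact absurd h' (by rw [e]; exact lt_irrefl _)
  · exact Prod.ext e (le_antisymm le le')

lemma pvInsertBy_nil (x : String × String) :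
    PySem.List.insertBy pvBefore x [] = [x] := rfl

lemma pvInsertBy_cons (x y : String × String) (ys : List (String × String)) :
    PySem.List.insertBy pvBefore x (y :: ys) =
      if pvBefore x y then x :: y :: ys else y :: PySem.List.insertBy pvBefore x ys := rfl

lemma pvInsertBy_pairwise (x : String × String) (acc : List (String × String))
    (h : acc.Pairwise pvLexLe) : (PySem.List.insertBy pvBefore x acc).Pairwise pvLexLe := by
  induction acc with
  | nil => simp [pvInsertBy_nil]
  | cons y ys ih =>
    rw [List.pairwise_cons] at h
    rw [pvInsertBy_cons]
    by_cases hb : pvBefore x y = true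
    · rw [if_pos hb]
      have hxy : pvLexLe x y := by
        rcases (pvBefore_iff x y).mp hb with h' | ⟨h1, h2⟩
        · exact Or.inl h'
        · exact Or.inr ⟨h1, le_of_lt h2⟩
      refine List.pairwise_cons.mpr ⟨?_, List.pairwise_cons.mpr h⟩
      intro z hz
      rcases List.mem_cons.mp hz with rfl | hz'
      · exact hxy
      · exact pvLexLe_trans hxy (h.1 z hz')
    · rw [if_neg hb]
      refine List.pairwise_cons.mpr ⟨?_, ih h.2⟩
      intro z hz
      have hm := (PySem.List.mem_insertBy pvBefore x z ys).mp hz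
      rcases hm with he | hz'
      · exact he ▸ (pvNotBefore_iff x y).mp hb
      · exact h.1 z hz'

lemma pvSorted2_pairwise (rows : List (String × String)) :
    (PySem.List.sorted2 rows (fun r => r.1) (fun r => r.2)).Pairwise pvLexLe := by
  have key : ∀ (l : List (String × String)) (acc : List (String × String)), acc.Pairwise pvLexLe →
      (l.foldl (fun acc x => PySem.List.insertBy pvBefore x acc) acc).Pairwise pvLexLe := by
    intro l
    induction l with
    | nil => intro acc h; exact h
    | cons x xs ih => intro acc h; exact ih _ (pvInsertBy_pairwise x acc h)
  exact key rows [] List.Pairwise.nil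

lemma pvFlatMap_congr {α β : Type} (l : List α) (f g : α → List β)
    (h : ∀ a ∈ l, f a = g a) : l.flatMap f = l.flatMap g := by
  induction l with
  | nil => rfl
  | cons x xs ih =>
    simp only [List.flatMap_cons]
    rw [h x List.mem_cons_self, ih (fun a ha => h a (List.mem_cons_of_mem _ ha))]

lemma pvPerm_flatMap_congr {α β : Type} (l : List α) (f g : α → List β)
    (h : ∀ a ∈ l, (f a).Perm (g a)) : (l.flatMap f).Perm (l.flatMap g) := by
  induction l with
  | nil => exact List.Perm.refl _
  | cons x xs ih =>
    simp only [List.flatMap_cons]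
    exact (h x List.mem_cons_self).append (ih (fun a ha => h a (List.mem_cons_of_mem _ ha)))

lemma pvFlatMap_filter_perm : ∀ (ks : List String) (rs : List (String × String)),
    ks.Nodup → (∀ r ∈ rs, r.1 ∈ ks) →
    (ks.flatMap (fun k => rs.filter (fun r => r.1 == k))).Perm rs := by
  intro ks
  induction ks with
  | nil =>
    intro rs _ hcov
    have : rs = [] := List.eq_nil_iff_forall_not_mem.mpr (fun r hr => by simpa using hcov r hr)
    simp [this]
  | cons k ks ih =>
    intro rs hnd hcov
    simp only [List.flatMap_cons]
    have hnd' := (List.nodup_cons.mp hnd)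
    have hfe : ∀ k' ∈ ks, rs.filter (fun r => r.1 == k') =
        (rs.filter (fun r => !(r.1 == k))).filter (fun r => r.1 == k') := by
      intro k' hk'
      rw [List.filter_filter]
      apply List.filter_congr
      intro r _
      have hne : ¬ k' = k := fun e => hnd'.1 (e ▸ hk')
      by_cases hrk : r.1 = k'
      · simp [hrk, hne]
      · simp [hrk]
    rw [pvFlatMap_congr ks _ _ hfe]
    have hcov' : ∀ r ∈ rs.filter (fun r => !(r.1 == k)), r.1 ∈ ks := by
      intro r hr
      rcases List.mem_filter.mp hr with ⟨hr1, hr2⟩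
      rcases List.mem_cons.mp (hcov r hr1) with he | h
      · exact absurd he (by simpa using hr2)
      · exact h
    have hih := (ih (rs.filter (fun r => !(r.1 == k))) hnd'.2 hcov')
    exact List.Perm.trans (List.Perm.append_left _ hih) (List.filter_append_perm _ rs)

lemma pvTarget_perm (rows : List (String × String)) : (pvTarget rows).Perm rows := by
  have h1 : ∀ k ∈ pvKs rows,
      ((PySem.List.sorted (pvNames rows k) (fun x => x)).map (fun n => (k, n))).Perm
        (rows.filter (fun r => r.1 == k)) := by
    intro k _
    have hp : ((PySem.List.sorted (pvNames rows k) (fun x => x)).map (fun n => (k, n))).Perm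
        ((pvNames rows k).map (fun n => (k, n))) :=
      (PySem.List.sorted_perm _ _ _).map _
    have he : (pvNames rows k).map (fun n => (k, n)) = rows.filter (fun r => r.1 == k) := by
      unfold pvNames
      rw [List.map_map]
      have : ∀ r ∈ rows.filter (fun r => r.1 == k), ((fun n => (k, n)) ∘ (fun r : String × String => r.2)) r = id r := by
        intro r hr
        have := (List.mem_filter.mp hr).2
        simp only [Function.comp, id]
        have h1 : r.1 = k := by simpa using this
        rw [← h1]
      rw [List.map_congr_left this, List.map_id]
    exact he ▸ hp
  have h2 := pvPerm_flatMap_congr (pvKs rows) _ _ h1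
  have hnd : (pvKs rows).Nodup := by
    have := PySem.List.sorted_ofList_pairwise_lt (rows.map (fun r => r.1))
    exact this.imp (fun h => ne_of_lt h)
  have hcov : ∀ r ∈ rows, r.1 ∈ pvKs rows := by
    intro r hr
    rw [pvKs, PySem.List.mem_sorted, PySem.Set.mem_ofList]
    exact List.mem_map.mpr ⟨r, hr, rfl⟩
  exact h2.trans (pvFlatMap_filter_perm (pvKs rows) rows hnd hcov)

lemma pvTarget_pairwise (rows : List (String × String)) : (pvTarget rows).Pairwise pvLexLe := by
  have key : ∀ ks : List String, ks.Pairwise (· < ·) →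
      (ks.flatMap (fun k => (PySem.List.sorted (pvNames rows k) (fun x => x)).map (fun n => (k, n)))).Pairwise pvLexLe := by
    intro ks
    induction ks with
    | nil => intro _; simp
    | cons k ks ih =>
      intro hks
      rw [List.pairwise_cons] at hks
      simp only [List.flatMap_cons]
      rw [List.pairwise_append]
      refine ⟨?_, ih hks.2, ?_⟩
      · have hp := PySem.List.sorted_pairwise (pvNames rows k) (fun x => x)
        exact hp.map _ (fun a b hab => Or.inr ⟨rfl, hab⟩)
      · intro a ha b hb
        rcases List.mem_map.mp ha with ⟨n, _, rfl⟩
        rcases List.mem_flatMap.mp hb with ⟨k', hk', hb'⟩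
        rcases List.mem_map.mp hb' with ⟨n', _, rfl⟩
        exact Or.inl (hks.1 k' hk')
  exact key (pvKs rows) (PySem.List.sorted_ofList_pairwise_lt (rows.map (fun r => r.1)))

lemma pvSorted2_eq (rows : List (String × String)) :
    PySem.List.sorted2 rows (fun r => r.1) (fun r => r.2) = pvTarget rows := by
  apply List.Perm.eq_of_pairwise
  · intro a b _ _ h1 h2
    exact pvLexLe_antisymm h1 h2
  · exact pvSorted2_pairwise rows
  · exact pvTarget_pairwise rows
  · exact ((PySem.List.sorted2_perm rows _ _ false).trans (pvTarget_perm rows).symm)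

lemma pvScan_same (k : String) : ∀ (ns : List String) (lines : List String),
    (ns.map (fun n => (k, n))).foldl pvStep (lines, some k)
      = (lines ++ ns.map (fun n => "  " ++ n), some k) := by
  intro ns
  induction ns with
  | nil => intro lines; simp
  | cons n ns ih =>
    intro lines
    simp only [List.map_cons, List.foldl_cons]
    rw [show pvStep (lines, some k) (k, n) = (lines ++ ["  " ++ n], some k) from by
      simp [pvStep]]
    rw [ih]
    simp

lemma pvScan_block (k : String) (ns : List String) (hne : ns ≠ [])
    (lines : List String) (prev : Option String) (hprev : prev ≠ some k) :
    (ns.map (fun n => (k, n))).foldl pvStep (lines, prev)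
      = (lines ++ (k ++ "/") :: ns.map (fun n => "  " ++ n), some k) := by
  cases ns with
  | nil => exact absurd rfl hne
  | cons n ns =>
    simp only [List.map_cons, List.foldl_cons]
    rw [show pvStep (lines, prev) (k, n) = (lines ++ [k ++ "/"] ++ ["  " ++ n], some k) from by
      simp [pvStep, if_neg hprev]]
    rw [pvScan_same]
    simp

lemma pvScan (rows : List (String × String)) : ∀ (ks : List String),
    ks.Pairwise (· < ·) → (∀ k ∈ ks, pvNames rows k ≠ []) →
    ∀ (lines : List String) (prev : Option String), (∀ k ∈ ks, prev ≠ some k) →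
    ((ks.flatMap (fun k => (PySem.List.sorted (pvNames rows k) (fun x => x)).map (fun n => (k, n)))).foldl
        pvStep (lines, prev)).1 = lines ++ ks.flatMap (pvBlockL rows)
    ∧ (((ks.flatMap (fun k => (PySem.List.sorted (pvNames rows k) (fun x => x)).map (fun n => (k, n)))).foldl
        pvStep (lines, prev)).2 = prev
       ∨ ∃ k ∈ ks, ((ks.flatMap (fun k => (PySem.List.sorted (pvNames rows k) (fun x => x)).map (fun n => (k, n)))).foldl
        pvStep (lines, prev)).2 = some k) := by
  intro ks
  induction ks with
  | nil => intro _ _ lines prev _; simp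
  | cons k ks ih =>
    intro hpw hne lines prev hprev
    rw [List.pairwise_cons] at hpw
    simp only [List.flatMap_cons, List.foldl_append]
    have hsne : PySem.List.sorted (pvNames rows k) (fun x => x) ≠ [] := by
      intro h
      exact hne k List.mem_cons_self ((PySem.List.sorted_eq_nil_iff _ _ _).mp h)
    rw [pvScan_block k _ hsne lines prev (hprev k List.mem_cons_self)]
    have hih := ih hpw.2 (fun k' hk' => hne k' (List.mem_cons_of_mem _ hk'))
      (lines ++ (k ++ "/") :: (PySem.List.sorted (pvNames rows k) (fun x => x)).map (fun n => "  " ++ n))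
      (some k)
      (fun k' hk' h => (ne_of_lt (hpw.1 k' hk')) (Option.some.inj h))
    constructor
    · rw [hih.1]
      simp [pvBlockL]
    · rcases hih.2 with h | ⟨k', hk', h⟩
      · exact Or.inr ⟨k, List.mem_cons_self, h⟩
      · exact Or.inr ⟨k', List.mem_cons_of_mem _ hk', h⟩
lemma pvKs_ne_nil (rows : List (String × String)) (h : rows ≠ []) : pvKs rows ≠ [] := by
  intro hk
  rw [pvKs, PySem.List.sorted_eq_nil_iff] at hk
  cases rows with
  | nil => exact h rfl
  | cons r l =>
    have : r.1 ∈ PySem.Set.ofList ((r :: l).map (fun r => r.1)) :=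
      (PySem.Set.mem_ofList _ _).mpr (List.mem_map.mpr ⟨r, List.mem_cons_self, rfl⟩)
    rw [hk] at this
    exact absurd this (List.not_mem_nil)

lemma pvNames_ne_nil (rows : List (String × String)) (k : String) (hk : k ∈ pvKs rows) :
    pvNames rows k ≠ [] := by
  rw [pvKs, PySem.List.mem_sorted, PySem.Set.mem_ofList] at hk
  rcases List.mem_map.mp hk with ⟨r, hr, rfl⟩
  have : r.2 ∈ pvNames rows r.1 := by
    unfold pvNames
    exact List.mem_map.mpr ⟨r, List.mem_filter.mpr ⟨hr, by simp⟩, rfl⟩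
  exact List.ne_nil_of_mem this

lemma pvLines_ne_nil (rows : List (String × String)) (h : rows ≠ []) : pvLines rows ≠ [] := by
  unfold pvLines
  have := pvKs_ne_nil rows h
  cases hks : pvKs rows with
  | nil => exact absurd hks this
  | cons k ks => simp [pvBlockL]

lemma pvB_eq (fm : List (String × List (String × String))) :
    format_actual_structure_py_alt fm =
      (if pvLines (fm.map pvExt) = [] then "(no files were moved)"
       else PySem.Str.join "\n" (pvLines (fm.map pvExt))) := by
  show (if PySem.List.sorted2 (fm.map pvExt) (fun r => r.1) (fun r => r.2) = []
    then "(no files were moved)"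
    else PySem.Str.join "\n"
      ((PySem.List.sorted2 (fm.map pvExt) (fun r => r.1) (fun r => r.2)).foldl pvStep ([], none)).1)
    = _
  set rows := fm.map pvExt with hrows
  rw [pvSorted2_eq rows]
  by_cases h : rows = []
  · rw [if_pos (by rw [h]; rfl), if_pos (by rw [h]; rfl)]
  · have hne : pvTarget rows ≠ [] := by
      intro hc
      exact h (List.Perm.eq_nil (hc ▸ (pvTarget_perm rows)).symm)
    rw [if_neg hne, if_neg (pvLines_ne_nil rows h)]
    have hscan := pvScan rows (pvKs rows)
      (PySem.List.sorted_ofList_pairwise_lt (rows.map (fun r => r.1)))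
      (fun k hk => pvNames_ne_nil rows k hk)
      [] none (fun k _ h => by simp at h)
    rw [show pvTarget rows = (pvKs rows).flatMap
        (fun k => (PySem.List.sorted (pvNames rows k) (fun x => x)).map (fun n => (k, n))) from rfl]
    rw [hscan.1]
    rfl

lemma pvA_eq (fm : List (String × List (String × String))) :
    format_actual_structure_py fm =
      (if pvLines (fm.map pvExt) = [] then "(no files were moved)"
       else PySem.Str.join "\n" (pvLines (fm.map pvExt))) := by
  unfold format_actual_structure_py
  have hfold : fm.foldl (fun d p =>
      let info := PySem.Dict.ofList p.2
      let folder := match info.get? "final_folder" with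
        | some f => if f = "" then "__root__ (not moved)" else f
        | none => "__root__ (not moved)"
      let name := (info.get? "final_name").getD p.1
      d.modify folder [] (fun fs => fs ++ [name])) PySem.Dict.empty
    = (fm.map pvExt).foldl (fun d r => d.modify r.1 [] (fun fs => fs ++ [r.2])) PySem.Dict.empty := by
    rw [List.foldl_map]; rfl
  rw [hfold]
  set rows := fm.map pvExt with hrows
  set d := rows.foldl (fun d r => d.modify r.1 [] (fun fs => fs ++ [r.2])) PySem.Dict.empty with hd
  have hnd : d.keys.Nodup := by
    rw [hd]
    exact PySem.Dict.nodup_keys_foldl_modify_key rows (fun r => r.1) [] (fun _ r => fun fs => fs ++ [r.2]) PySem.Dict.empty (by simp [PySem.Dict.empty, PySem.Dict.keys])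
  have hkeys : d.keys = PySem.Set.ofList (rows.map (fun r => r.1)) := by
    rw [hd]
    exact PySem.Dict.keys_foldl_modify_key rows (fun r => r.1) [] (fun _ r => fun fs => fs ++ [r.2]) PySem.Dict.empty
  have hgetD : ∀ k, d.getD k [] = pvNames rows k := by
    intro k
    rw [hd, PySem.Dict.getD_foldl_modify_append]
    simp [PySem.Dict.getD_empty, pvNames]
  have hsorted : PySem.List.sorted d.items (fun g => g.1) =
      (pvKs rows).map (fun k => (k, pvNames rows k)) := by
    apply PySem.List.sorted_eq_of_perm_of_pairwise_lt
    · have h1 : (pvKs rows).map (fun k => (k, pvNames rows k)) =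
          (pvKs rows).map (fun k => (k, d.getD k [])) := by
        apply List.map_congr_left; intro k _; rw [hgetD]
      rw [h1, PySem.Dict.items_eq_map_keys d hnd [], hkeys]
      exact List.Perm.map _ (PySem.List.sorted_perm _ _ _)
    · exact List.Pairwise.map _ (fun a b h => h) (PySem.List.sorted_ofList_pairwise_lt _)
  show (if (PySem.List.sorted d.items (fun g => g.1)).foldl
      (fun lines g => (PySem.List.sorted g.2 (fun x => x)).foldl
        (fun ls f => ls ++ ["  " ++ f]) (lines ++ [g.1 ++ "/"])) [] = []
    then "(no files were moved)"
    else PySem.Str.join "\n" ((PySem.List.sorted d.items (fun g => g.1)).foldl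
      (fun lines g => (PySem.List.sorted g.2 (fun x => x)).foldl
        (fun ls f => ls ++ ["  " ++ f]) (lines ++ [g.1 ++ "/"])) []))
    = if pvLines rows = [] then "(no files were moved)" else PySem.Str.join "\n" (pvLines rows)
  rw [hsorted]
  have hlines : ((pvKs rows).map (fun k => (k, pvNames rows k))).foldl
      (fun lines g =>
        (PySem.List.sorted g.2 (fun x => x)).foldl
          (fun ls f => ls ++ ["  " ++ f]) (lines ++ [g.1 ++ "/"]))
      [] = pvLines rows := by
    rw [List.foldl_map]
    have hbody : (fun (lines : List String) (k : String) =>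
        (PySem.List.sorted (pvNames rows k) (fun x => x)).foldl
          (fun ls f => ls ++ ["  " ++ f]) (lines ++ [k ++ "/"]))
        = fun lines k => lines ++ pvBlockL rows k := by
      funext lines k
      rw [PySem.List.foldl_append_singleton_eq_map]
      simp [pvBlockL]
    rw [show (fun (x : List String) (y : String) =>
        (PySem.List.sorted (y, pvNames rows y).2 fun x => x).foldl
          (fun ls f => ls ++ ["  " ++ f]) (x ++ [(y, pvNames rows y).1 ++ "/"])) =
        fun lines k => lines ++ pvBlockL rows k from hbody]
    rw [PySem.List.foldl_append_eq_flatMap]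
    simp [pvLines]
  rw [hlines]

-- ===== VERDICT (by name: the statement is the Claim_ definition above) =====
theorem format_actual_structure_py_spec : Claim_equal_format_actual_structure_py := by
  intro fm _
  unfold Spec_format_actual_structure_py
  rw [pvA_eq, pvB_eq]
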